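-- pv_equiv track=rewrite | github.com/Str-Ben/StructureBench | data/text_models_generate.py | _strip_think_blocks
-- ===== SOURCE A (Python) =====
-- from typing import Any, Dict, Iterable, Mapping, Optional, Tuple
--
-- def _strip_think_blocks(text: str) -> Tuple[str, str]:
--     """
--     Remove <think>...</think> blocks. If a closing tag is missing, return status "truncated_think".
--     """
--     if text is None:
--         return "", "ok"
--     s = str(text)
--     start = s.find("<think>")
--     if start == -1:
--         return s, "ok"
--
--     parts = []
--     pos = 0
--     while True:
--         start = s.find("<think>", pos)
--         if start == -1:
--             parts.append(s[pos:])
--             return "".join(parts), "ok"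
--         end = s.find("</think>", start + len("<think>"))
--         if end == -1:
--             return "", "truncated_think"
--         parts.append(s[pos:start])
--         pos = end + len("</think>")
-- ===== SOURCE B (Python) =====
-- from typing import Tuple
--
--
-- def _strip_think_blocks(text: str) -> Tuple[str, str]:
--     """
--     Remove <think>...</think> blocks. If a closing tag is missing, return status "truncated_think".
--
--     Single left-to-right character scan with an in_think state flag, instead of
--     repeated find() jumps and a parts list.
--     """
--     if text is None:
--         return "", "ok"
--     s = str(text)
--     out = []
--     i, n = 0, len(s)
--     in_think = False
--     while i < n:
--         if not in_think and s.startswith("<think>", i):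
--             in_think = True
--             i += 7
--         elif in_think and s.startswith("</think>", i):
--             in_think = False
--             i += 8
--         elif in_think:
--             i += 1
--         else:
--             out.append(s[i])
--             i += 1
--     if in_think:
--         return "", "truncated_think"
--     return "".join(out), "ok"
-- ===== Notes on version B (the rewrite author's own statement) =====
-- stated objective: alternative
-- what changed: Replaced A's find()-jumping loop that collects slices into a parts list and joins them with a single left-to-right character-scan automaton carrying an in_think flag and emitting kept characters one by one.
import Mathlib
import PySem

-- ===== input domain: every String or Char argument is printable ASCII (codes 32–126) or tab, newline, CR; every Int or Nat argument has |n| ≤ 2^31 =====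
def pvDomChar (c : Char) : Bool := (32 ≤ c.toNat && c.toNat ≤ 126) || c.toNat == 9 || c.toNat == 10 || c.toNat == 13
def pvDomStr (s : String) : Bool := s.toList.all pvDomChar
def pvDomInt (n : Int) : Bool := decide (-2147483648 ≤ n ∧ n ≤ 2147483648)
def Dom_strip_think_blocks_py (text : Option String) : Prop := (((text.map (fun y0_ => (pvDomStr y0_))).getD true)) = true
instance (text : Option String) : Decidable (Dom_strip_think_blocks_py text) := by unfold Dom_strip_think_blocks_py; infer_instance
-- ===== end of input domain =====

-- B replaces A's find()-jumping loop (slices collected in a parts list) by a single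
-- character-by-character scan with an in_think flag; same O(n) cost, alternative structure.

-- ===== PORT A =====
def pvOpenTag : List Char := "<think>".toList
def pvCloseTag : List Char := "</think>".toList

-- A's `while True` loop; fuel only makes the recursion structural (it is proved never to
-- run out: each iteration moves `pos` forward and `pos` never exceeds `s.length`).
def pvStripALoop (s : List Char) (pos : Nat) (parts : List (List Char)) : Nat → List Char × String
  | 0 => ([], "fuel")
  | fuel + 1 =>
    let start := PySem.Chars.findFrom s pvOpenTag (pos : Int)
    if start = -1 then
      (PySem.Chars.join [] (parts ++ [PySem.Chars.slice s (some (pos : Int)) none]), "ok")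
    else
      let endI := PySem.Chars.findFrom s pvCloseTag (start + 7)
      if endI = -1 then ([], "truncated_think")
      else
        pvStripALoop s (endI.toNat + 8)
          (parts ++ [PySem.Chars.slice s (some (pos : Int)) (some start)]) fuel

def strip_think_blocks_py (text : Option String) : String × String :=
  match text with
  | none => ("", "ok")
  | some t =>
    let s := t.toList
    let start := PySem.Chars.find s pvOpenTag
    if start = -1 then (t, "ok")
    else
      let r := pvStripALoop s 0 [] (s.length + 1)
      (String.ofList r.1, r.2)

-- ===== PORT B =====
-- s.startswith(tag, i) with 0 ≤ i is exactly `startswith (s.drop i) tag`.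
def pvScanB (s : List Char) (i : Nat) (inT : Bool) (out : List Char) : List Char × String :=
  if _h : i < s.length then
    if !inT && PySem.Chars.startswith (s.drop i) pvOpenTag then
      pvScanB s (i + 7) true out
    else if inT && PySem.Chars.startswith (s.drop i) pvCloseTag then
      pvScanB s (i + 8) false out
    else if inT then
      pvScanB s (i + 1) true out
    else
      pvScanB s (i + 1) false (out ++ [s.getD i ' '])
  else if inT then ([], "truncated_think") else (out, "ok")
termination_by s.length - i
decreasing_by all_goals omega

def strip_think_blocks_py_alt (text : Option String) : String × String :=
  match text with
  | none => ("", "ok")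
  | some t =>
    let s := t.toList
    let r := pvScanB s 0 false []
    (String.ofList r.1, r.2)

-- ===== PRECONDITION & SPEC =====
def Spec_strip_think_blocks_py (text : Option String) (out : String × String) : Prop := out = strip_think_blocks_py_alt text
instance (text : Option String) (out : String × String) : Decidable (Spec_strip_think_blocks_py text out) := by unfold Spec_strip_think_blocks_py; infer_instance

-- ===== CLAIM (what is proved, stated in full; the proofs are below) =====
def Claim_equal_strip_think_blocks_py : Prop := ∀ (text : Option String), Dom_strip_think_blocks_py text → Spec_strip_think_blocks_py text (strip_think_blocks_py text)

-- ===== LEMMAS AND PROOFS =====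

theorem pvJoinNil (l : List (List Char)) : PySem.Chars.join [] l = l.flatten := by
  induction l with
  | nil => simp [PySem.Chars.join_nil]
  | cons p rest ih =>
    cases rest with
    | nil => simp [PySem.Chars.join_singleton]
    | cons q r => simp [PySem.Chars.join_cons_cons] at ih ⊢; simpa using ih

-- a prefix of a later suffix is an infix of an earlier suffix
theorem pvPrefixDropInfix (s sub : List Char) (k j : Nat) (hk : k ≤ j)
    (h : sub <+: s.drop j) : sub <:+: s.drop k := by
  have : s.drop j = (s.drop k).drop (j - k) := by rw [List.drop_drop]; congr 1; omega
  rw [this] at h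
  exact h.isInfix.trans (List.drop_suffix _ _).isInfix

-- L1: inside an unterminated think block the scan skips to the end and reports truncation
theorem pvScanB_trunc (s : List Char) (i : Nat) (out : List Char)
    (hno : ∀ j, i ≤ j → ¬ pvCloseTag <+: s.drop j) :
    pvScanB s i true out = ([], "truncated_think") := by
  rw [pvScanB]
  by_cases h : i < s.length
  · simp only [h, dif_pos]
    have hcl : PySem.Chars.startswith (s.drop i) pvCloseTag = false := by
      rw [Bool.eq_false_iff]; intro hsw
      exact hno i le_rfl ((PySem.Chars.startswith_iff _ _).mp hsw)
    simp only [Bool.not_true, Bool.false_and, Bool.true_and, hcl, Bool.false_eq_true, if_false]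
    exact pvScanB_trunc s (i + 1) out (fun j hj => hno j (by omega))
  · simp [h]
termination_by s.length - i
decreasing_by omega

-- L2: the scan skips from i to the first closing tag at e and leaves think mode
theorem pvScanB_skip (s : List Char) (i e : Nat) (out : List Char)
    (hie : i ≤ e) (hen : e + 8 ≤ s.length) (hcl : pvCloseTag <+: s.drop e)
    (hmin : ∀ j, i ≤ j → j < e → ¬ pvCloseTag <+: s.drop j) :
    pvScanB s i true out = pvScanB s (e + 8) false out := by
  rcases Nat.lt_or_ge i e with hlt | hge
  · rw [pvScanB]
    have h : i < s.length := by omega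
    have hc : PySem.Chars.startswith (s.drop i) pvCloseTag = false := by
      rw [Bool.eq_false_iff]; intro hsw
      exact hmin i le_rfl hlt ((PySem.Chars.startswith_iff _ _).mp hsw)
    simp only [h, dif_pos, Bool.not_true, Bool.false_and, Bool.true_and, hc,
      Bool.false_eq_true, if_false, if_true]
    exact pvScanB_skip s (i + 1) e out (by omega) hen hcl (fun j hj1 hj2 => hmin j (by omega) hj2)
  · have hieq : i = e := by omega
    subst hieq
    rw [pvScanB]
    have h : i < s.length := by omega
    have hc : PySem.Chars.startswith (s.drop i) pvCloseTag = true :=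
      (PySem.Chars.startswith_iff _ _).mpr hcl
    simp [h, hc]
termination_by e - i

-- L3: with no opening tag ahead, the scan copies the rest of the string
theorem pvScanB_copy_end (s : List Char) (i : Nat) (out : List Char)
    (hno : ∀ j, i ≤ j → ¬ pvOpenTag <+: s.drop j) :
    pvScanB s i false out = (out ++ s.drop i, "ok") := by
  rw [pvScanB]
  by_cases h : i < s.length
  · have hc : PySem.Chars.startswith (s.drop i) pvOpenTag = false := by
      rw [Bool.eq_false_iff]; intro hsw
      exact hno i le_rfl ((PySem.Chars.startswith_iff _ _).mp hsw)
    simp only [h, dif_pos, Bool.not_false, Bool.true_and, Bool.false_and, hc,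
      Bool.false_eq_true, if_false]
    rw [pvScanB_copy_end s (i + 1) _ (fun j hj => hno j (by omega))]
    rw [List.drop_eq_getElem_cons h]
    simp [List.getD_eq_getElem?_getD, List.getElem?_eq_getElem h]
  · have hle : s.length ≤ i := by omega
    simp [h, List.drop_eq_nil_of_le hle]
termination_by s.length - i
decreasing_by all_goals omega

-- L4: the scan copies up to the first opening tag at st and enters think mode
theorem pvScanB_copy_to (s : List Char) (i st : Nat) (out : List Char)
    (hle : i ≤ st) (hop : pvOpenTag <+: s.drop st)
    (hmin : ∀ j, i ≤ j → j < st → ¬ pvOpenTag <+: s.drop j) :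
    pvScanB s i false out = pvScanB s (st + 7) true (out ++ (s.drop i).take (st - i)) := by
  have hstn : st + 7 ≤ s.length := by
    have := hop.length_le
    simp [pvOpenTag, List.length_drop] at this
    omega
  rcases Nat.lt_or_ge i st with hlt | hge
  · rw [pvScanB]
    have h : i < s.length := by omega
    have hc : PySem.Chars.startswith (s.drop i) pvOpenTag = false := by
      rw [Bool.eq_false_iff]; intro hsw
      exact hmin i le_rfl hlt ((PySem.Chars.startswith_iff _ _).mp hsw)
    simp only [h, dif_pos, Bool.not_false, Bool.true_and, Bool.false_and, hc,
      Bool.false_eq_true, if_false]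
    rw [pvScanB_copy_to s (i + 1) st _ (by omega) hop (fun j hj1 hj2 => hmin j (by omega) hj2)]
    congr 1
    rw [List.append_assoc]
    congr 1
    rw [List.drop_eq_getElem_cons h]
    have : st - i = (st - (i + 1)) + 1 := by omega
    rw [this, List.take_succ_cons]
    simp [List.getD_eq_getElem?_getD, List.getElem?_eq_getElem h]
  · have : i = st := by omega
    subst this
    rw [pvScanB]
    have h : i < s.length := by omega
    have hc : PySem.Chars.startswith (s.drop i) pvOpenTag = true :=
      (PySem.Chars.startswith_iff _ _).mpr hop
    simp [h, hc]
termination_by st - i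

-- Main loop correspondence: A's loop from pos equals B's scan from pos
theorem pvLoop_eq_scan (s : List Char) (fuel pos : Nat) (parts : List (List Char))
    (hpos : pos ≤ s.length) (hfuel : s.length + 1 - pos ≤ fuel) :
    pvStripALoop s pos parts fuel = pvScanB s pos false (PySem.Chars.join [] parts) := by
  match fuel with
  | 0 => omega
  | fuel + 1 =>
    rw [pvStripALoop]
    by_cases hst : PySem.Chars.findFrom s pvOpenTag (pos : Int) = -1
    · have hninf := (PySem.Chars.findFrom_natCast_eq_neg_one_iff s pvOpenTag pos hpos).mp hst
      have hno : ∀ j, pos ≤ j → ¬ pvOpenTag <+: s.drop j := fun j hj hpre =>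
        hninf (pvPrefixDropInfix s pvOpenTag pos j hj hpre)
      rw [pvScanB_copy_end s pos _ hno]
      simp [hst, pvJoinNil, PySem.Chars.slice_eq_listSlice,
        PySem.List.slice_from_natCast]
    · obtain ⟨hge, hpre0, hmin0⟩ := PySem.Chars.findFrom_natCast_spec s pvOpenTag pos hpos hst
      obtain ⟨st, hstI⟩ : ∃ st : Nat, PySem.Chars.findFrom s pvOpenTag (pos : Int) = (st : Int) :=
        ⟨_, (Int.toNat_of_nonneg (by omega)).symm⟩
      rw [hstI] at hge hpre0 hmin0
      simp only [Int.toNat_natCast] at hpre0 hmin0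
      simp only [hstI]
      have hposst : pos ≤ st := by exact_mod_cast hge
      have hstn : st + 7 ≤ s.length := by
        have := hpre0.length_le
        simp [pvOpenTag, List.length_drop] at this
        omega
      rw [pvScanB_copy_to s pos st _ hposst hpre0 hmin0]
      rw [if_neg (by omega : ¬((st : Int) = -1))]
      have h7 : (st : Int) + 7 = ((st + 7 : Nat) : Int) := by push_cast; ring
      rw [h7]
      by_cases hend : PySem.Chars.findFrom s pvCloseTag ((st + 7 : Nat) : Int) = -1
      · have hninf := (PySem.Chars.findFrom_natCast_eq_neg_one_iff s pvCloseTag (st + 7) hstn).mp hend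
        rw [pvScanB_trunc s (st + 7) _
          (fun j hj hp => hninf (pvPrefixDropInfix s pvCloseTag (st + 7) j hj hp))]
        rw [hend]
        simp only [reduceIte]
      · obtain ⟨hge2, hpre2, hmin2⟩ := PySem.Chars.findFrom_natCast_spec s pvCloseTag (st + 7) hstn hend
        obtain ⟨e, heI⟩ : ∃ e : Nat, PySem.Chars.findFrom s pvCloseTag ((st + 7 : Nat) : Int) = (e : Int) :=
          ⟨_, (Int.toNat_of_nonneg (by omega)).symm⟩
        rw [heI] at hge2 hpre2 hmin2 ⊢
        simp only [Int.toNat_natCast] at hpre2 hmin2 ⊢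
        have hest : st + 7 ≤ e := by exact_mod_cast hge2
        have hen : e + 8 ≤ s.length := by
          have := hpre2.length_le
          simp [pvCloseTag, List.length_drop] at this
          omega
        rw [if_neg (by omega : ¬((e : Int) = -1))]
        rw [pvScanB_skip s (st + 7) e _ hest hen hpre2 hmin2]
        rw [pvLoop_eq_scan s fuel (e + 8) _ hen (by omega)]
        congr 1
        rw [pvJoinNil, pvJoinNil, List.flatten_append]
        simp [PySem.Chars.slice_eq_listSlice, PySem.List.slice_natCast]

-- ===== VERDICT (by name: the statement is the Claim_ definition above) =====
theorem strip_think_blocks_py_spec : Claim_equal_strip_think_blocks_py := by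
  intro text _
  unfold Spec_strip_think_blocks_py strip_think_blocks_py strip_think_blocks_py_alt
  match text with
  | none => rfl
  | some t =>
    simp only
    set s := t.toList with hs
    by_cases hfind : PySem.Chars.find s pvOpenTag = -1
    · have hst : PySem.Chars.findFrom s pvOpenTag ((0 : Nat) : Int) = -1 := by
        simpa [PySem.Chars.findFrom_zero] using hfind
      have hninf := (PySem.Chars.findFrom_natCast_eq_neg_one_iff s pvOpenTag 0 (Nat.zero_le _)).mp hst
      have hno : ∀ j, 0 ≤ j → ¬ pvOpenTag <+: s.drop j := fun j hj hpre =>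
        hninf (pvPrefixDropInfix s pvOpenTag 0 j hj hpre)
      rw [pvScanB_copy_end s 0 [] hno]
      rw [hs] at hfind
      simp [hfind, hs, String.ofList_toList]
    · rw [pvLoop_eq_scan s (s.length + 1) 0 [] (Nat.zero_le _) (by omega)]
      simp [hfind, PySem.Chars.join_nil]
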